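-- pv_equiv track=rewrite | github.com/syntomic/interview | code/permutation.py | max_sum_B
-- ===== SOURCE A (Python) =====
-- def max_sum_B(A):
--     n = len(A)
--     A_sorted = sorted(A)
--     A_prime = [0] * n
--     i, j = 0, n-1
--     for k in range(n):
--         if k % 2 == 1:
--             A_prime[k] = A_sorted[j]
--             j -= 1
--         else:
--             A_prime[k] = A_sorted[i]
--             i += 1
--     B = [max(0, A_prime[i+1]-A_prime[i]) for i in range(n-1)]
--     max_B_sum = sum(B)
--     return max_B_sum, A_prime
-- ===== SOURCE B (Python) =====
-- def max_sum_B(A):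
--     s = sorted(A)
--     n = len(s)
--     k = n // 2
--     max_B_sum = sum(s[n - k:]) - sum(s[:k])
--
--     def zig(t):
--         if len(t) <= 1:
--             return list(t)
--         return [t[0], t[-1]] + zig(t[1:-1])
--
--     return max_B_sum, zig(s)
-- ===== Notes on version B (the rewrite author's own statement) =====
-- stated objective: alternative
-- what changed: B never scans adjacent differences: it computes the answer in closed form as the sum of the top half of the sorted list minus the sum of its bottom half, and builds the zigzag arrangement by recursively peeling the first and last element of the sorted list instead of A's two-pointer index fill.
import Mathlib
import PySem

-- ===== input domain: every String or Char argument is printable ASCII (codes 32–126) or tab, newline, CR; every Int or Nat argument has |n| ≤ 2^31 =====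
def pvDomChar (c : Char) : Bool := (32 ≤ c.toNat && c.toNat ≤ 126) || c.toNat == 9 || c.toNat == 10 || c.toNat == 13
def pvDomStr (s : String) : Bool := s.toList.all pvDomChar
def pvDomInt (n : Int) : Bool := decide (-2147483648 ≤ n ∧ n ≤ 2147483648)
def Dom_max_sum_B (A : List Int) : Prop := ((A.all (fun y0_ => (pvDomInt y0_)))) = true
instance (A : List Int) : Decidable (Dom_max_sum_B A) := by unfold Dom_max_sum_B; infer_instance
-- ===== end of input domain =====

-- B computes the answer sum in closed form from the sorted list (sum of its top half minus
-- its bottom half, no adjacent-difference scan) and builds the zigzag list by recursively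
-- peeling the smallest and largest remaining element; objective: alternative decomposition.


-- ===== PORT A =====
def max_sum_B (A : List Int) : Int × List Int :=
  let n : Int := A.length
  let ASorted := PySem.List.sorted A (fun x => x) false
  let st := (PySem.List.pyRange 0 n 1).foldl
    (fun (st : List Int × Int × Int) k =>
      if PySem.Int.mod k 2 = 1 then
        (PySem.List.pySetD st.1 k (PySem.List.pyGetD ASorted st.2.2 0), st.2.1, st.2.2 - 1)
      else
        (PySem.List.pySetD st.1 k (PySem.List.pyGetD ASorted st.2.1 0), st.2.1 + 1, st.2.2))
    (List.replicate n.toNat 0, 0, n - 1)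
  let APrime := st.1
  let B := (PySem.List.pyRange 0 (n - 1) 1).map
    (fun i => max 0 (PySem.List.pyGetD APrime (i+1) 0 - PySem.List.pyGetD APrime i 0))
  (B.sum, APrime)

-- ===== PORT B =====
-- zig(t): peel the first and last element of t, recurse on t[1:-1]
def zigPeel (t : List Int) : List Int :=
  if t.length ≤ 1 then t
  else [PySem.List.pyGetD t 0 0, PySem.List.pyGetD t (-1) 0]
         ++ zigPeel (PySem.List.slice t (some 1) (some (-1)))
termination_by t.length
decreasing_by
  simp only [PySem.List.slice, PySem.List.clampIdx]
  split_ifs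
  all_goals simp_all
  all_goals omega

def max_sum_B_alt (A : List Int) : Int × List Int :=
  let s := PySem.List.sorted A (fun x => x) false
  let n : Int := s.length
  let k := PySem.Int.floordiv n 2
  let maxBSum := (PySem.List.slice s (some (n - k)) none).sum
                   - (PySem.List.slice s none (some k)).sum
  (maxBSum, zigPeel s)

-- ===== PRECONDITION & SPEC =====
def Spec_max_sum_B (A : List Int) (out : Int × List Int) : Prop := out = max_sum_B_alt A
instance (A : List Int) (out : Int × List Int) : Decidable (Spec_max_sum_B A out) := by unfold Spec_max_sum_B; infer_instance

-- ===== CLAIM (what is proved, stated in full; the proofs are below) =====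
def Claim_equal_max_sum_B : Prop := ∀ (A : List Int), Dom_max_sum_B A → Spec_max_sum_B A (max_sum_B A)

-- ===== LEMMAS AND PROOFS =====

-- value at position k of the zigzag arrangement of s (even slots from the front, odd from the back)
def zigVal (s : List Int) (k : Nat) : Int :=
  if k % 2 = 0 then s.getD (k / 2) 0 else s.getD (s.length - 1 - k / 2) 0

def zigList (s : List Int) : List Int := (List.range s.length).map (zigVal s)

lemma foldA_inv (s : List Int) (t : Nat) (ht : t ≤ s.length) :
    (PySem.List.pyRange 0 (t : Int) 1).foldl
      (fun (st : List Int × Int × Int) k =>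
        if PySem.Int.mod k 2 = 1 then
          (PySem.List.pySetD st.1 k (PySem.List.pyGetD s st.2.2 0), st.2.1, st.2.2 - 1)
        else
          (PySem.List.pySetD st.1 k (PySem.List.pyGetD s st.2.1 0), st.2.1 + 1, st.2.2))
      (List.replicate s.length 0, 0, (s.length : Int) - 1)
    = ((List.range s.length).map (fun k => if k < t then zigVal s k else 0),
       (((t + 1) / 2 : Nat) : Int), (s.length : Int) - 1 - ((t / 2 : Nat) : Int)) := by
  induction t with
  | zero =>
      simp [PySem.List.pyRange_one_eq_nil, List.map_const']
  | succ t ih =>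
      have ht' : t ≤ s.length := by omega
      have hlt : t < s.length := by omega
      rw [show ((t + 1 : Nat) : Int) = (t : Int) + 1 by push_cast; ring,
        PySem.List.pyRange_one_succ_right (by positivity), List.foldl_append, ih ht']
      simp only [List.foldl_cons, List.foldl_nil]
      have hmod : PySem.Int.mod (t : Int) 2 = ((t % 2 : Nat) : Int) := by
        exact_mod_cast PySem.Int.mod_natCast t 2
      by_cases hpar : t % 2 = 1
      · rw [if_pos (by rw [hmod, hpar]; rfl)]
        have hj : (s.length : Int) - 1 - ((t / 2 : Nat) : Int) = ((s.length - 1 - t / 2 : Nat) : Int) := by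
          push_cast; omega
        rw [hj, PySem.List.pyGetD_natCast, PySem.List.pySetD_natCast]
        simp only [Prod.mk.injEq]
        refine ⟨?_, by push_cast; omega, by push_cast; omega⟩
        apply List.ext_getElem
        · simp
        · intro k hk1 hk2
          simp only [List.length_set, List.length_map, List.length_range] at hk1
          simp only [List.getElem_set, List.getElem_map, List.getElem_range]
          rcases eq_or_ne t k with rfl | hne
          · simp [zigVal, hpar]
          · simp only [if_neg hne]
            have : k < t ↔ k < t + 1 := by omega
            simp [this]
      · rw [if_neg (by rw [hmod]; intro h; exact hpar (by exact_mod_cast h))]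
        rw [PySem.List.pyGetD_natCast, PySem.List.pySetD_natCast]
        simp only [Prod.mk.injEq]
        refine ⟨?_, by push_cast; omega, by push_cast; omega⟩
        apply List.ext_getElem
        · simp
        · intro k hk1 hk2
          simp only [List.length_set, List.length_map, List.length_range] at hk1
          simp only [List.getElem_set, List.getElem_map, List.getElem_range]
          rcases eq_or_ne t k with rfl | hne
          · have he : t % 2 = 0 := by omega
            have h2 : (t + 1) / 2 = t / 2 := by omega
            simp [zigVal, he, h2]
          · simp only [if_neg hne]
            have : k < t ↔ k < t + 1 := by omega
            simp [this]

lemma A_parts (A : List Int) :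
    max_sum_B A =
      (((PySem.List.pyRange 0 (((PySem.List.sorted A (fun x => x) false).length : Int) - 1) 1).map
          (fun i => max 0 (PySem.List.pyGetD (zigList (PySem.List.sorted A (fun x => x) false)) (i+1) 0
            - PySem.List.pyGetD (zigList (PySem.List.sorted A (fun x => x) false)) i 0))).sum,
        zigList (PySem.List.sorted A (fun x => x) false)) := by
  have hlen : (PySem.List.sorted A (fun x => x) false).length = A.length :=
    PySem.List.length_sorted A _ _
  have hList : (List.range (PySem.List.sorted A (fun x => x) false).length).map
      (fun k => if k < (PySem.List.sorted A (fun x => x) false).length then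
        zigVal (PySem.List.sorted A (fun x => x) false) k else 0)
      = zigList (PySem.List.sorted A (fun x => x) false) := by
    unfold zigList
    apply List.map_congr_left
    intro k hk
    simp only [List.mem_range] at hk
    rw [if_pos hk]
  simp only [max_sum_B, Int.toNat_natCast]
  rw [← hlen, foldA_inv _ _ (le_refl _)]
  simp only [hList]

lemma zigList_getD (t : List Int) (j : Nat) (hj : j < t.length) :
    (zigList t).getD j 0 = zigVal t j := by
  unfold zigList
  rw [List.getD_eq_getElem _ _ (by simpa using hj)]
  simp

lemma slice_one_negone (t : List Int) (h : 2 ≤ t.length) :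
    PySem.List.slice t (some 1) (some (-1)) = (t.drop 1).dropLast := by
  have hne : t ≠ [] := by intro hn; simp [hn] at h
  have h1 : min 1 t.length = 1 := by omega
  have h2 : ((t.length : Int) + -1).toNat = t.length - 1 := by omega
  simp [PySem.List.slice, PySem.List.clampIdx, if_neg hne, h1, h2]
  rw [List.dropLast_eq_take]
  congr 1
  simp

lemma zigVal_mid (t : List Int) (j : Nat) (hj : j < t.length - 2) :
    zigVal ((t.drop 1).dropLast) j = zigVal t (j + 2) := by
  have hlen : ((t.drop 1).dropLast).length = t.length - 2 := by simp; omega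
  unfold zigVal
  have hget : ∀ i, i < t.length - 2 → ((t.drop 1).dropLast).getD i 0 = t.getD (i + 1) 0 := by
    intro i hi
    rw [List.getD_eq_getElem _ _ (by omega), List.getD_eq_getElem _ _ (by omega)]
    simp only [List.getElem_dropLast, List.getElem_drop]
    congr 1
    omega
  by_cases hp : j % 2 = 0
  · rw [if_pos hp, if_pos (by omega), hget (j / 2) (by omega)]
    congr 1
    omega
  · rw [if_neg hp, if_neg (by omega), hlen, hget (t.length - 2 - 1 - j / 2) (by omega)]
    congr 1
    omega

lemma zigList_cons (t : List Int) (h : 2 ≤ t.length) :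
    zigList t = t.getD 0 0 :: t.getD (t.length - 1) 0 :: zigList ((t.drop 1).dropLast) := by
  obtain ⟨m, hm⟩ : ∃ m, t.length = m + 2 := ⟨t.length - 2, by omega⟩
  have hlen : ((t.drop 1).dropLast).length = m := by simp [hm]
  unfold zigList
  rw [hm, hlen, List.range_succ_eq_map, List.range_succ_eq_map]
  simp only [List.map_cons, List.map_map]
  refine congrArg₂ _ ?_ (congrArg₂ _ ?_ ?_)
  · simp [zigVal]
  · simp [zigVal, hm]
  · apply List.map_congr_left
    intro j hj
    simp only [List.mem_range] at hj
    simp only [Function.comp_apply]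
    rw [zigVal_mid t j (by omega)]

lemma zigPeel_eq (t : List Int) : zigPeel t = zigList t := by
  induction t using zigPeel.induct with
  | case1 t h =>
      rw [zigPeel, if_pos h]
      match t, h with
      | [], _ => rfl
      | [a], _ => simp [zigList, zigVal]
  | case2 t h ih =>
      have h2 : 2 ≤ t.length := by omega
      have hne : t ≠ [] := by intro hn; simp [hn] at h2
      rw [slice_one_negone t h2] at ih
      rw [zigPeel, if_neg h, slice_one_negone t h2, ih, zigList_cons t h2]
      simp only [List.cons_append, List.nil_append]
      congr 1
      · rw [show (0 : Int) = ((0 : Nat) : Int) from rfl, PySem.List.pyGetD_natCast]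
      · congr 1
        rw [PySem.List.pyGetD_neg_one _ _ hne, List.getLast_eq_getElem,
          List.getD_eq_getElem _ _ (by omega)]

lemma getD_sum_take (s : List Int) (k : Nat) (hk : k ≤ s.length) :
    ((List.range k).map (fun i => s.getD i 0)).sum = (s.take k).sum := by
  induction k with
  | zero => simp
  | succ k ih =>
      rw [List.range_succ, List.map_append, List.sum_append, ih (by omega),
        List.sum_take_succ s k (by omega)]
      simp only [List.map_cons, List.map_nil, List.sum_cons, List.sum_nil, add_zero]
      rw [List.getD_eq_getElem _ _ (by omega)]

lemma getD_sum_drop (s : List Int) (k : Nat) (hk : k ≤ s.length) :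
    ((List.range k).map (fun i => s.getD (s.length - 1 - i) 0)).sum = (s.drop (s.length - k)).sum := by
  have h1 : ((List.range k).map (fun i => s.getD (s.length - 1 - i) 0)).sum
      = ∑ i ∈ Finset.range k, s.getD (s.length - 1 - i) 0 := rfl
  have h2 : ∑ i ∈ Finset.range k, s.getD (s.length - 1 - i) 0
      = ∑ i ∈ Finset.range k, s.getD (s.length - k + i) 0 := by
    rw [← Finset.sum_range_reflect]
    apply Finset.sum_congr rfl
    intro i hi
    simp only [Finset.mem_range] at hi
    congr 1
    omega
  have h3 : ∑ i ∈ Finset.range k, s.getD (s.length - k + i) 0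
      = ((List.range k).map (fun i => (s.drop (s.length - k)).getD i 0)).sum := by
    show _ = ∑ i ∈ Finset.range k, (s.drop (s.length - k)).getD i 0
    apply Finset.sum_congr rfl
    intro i hi
    simp only [Finset.mem_range] at hi
    rw [List.getD_eq_getElem _ _ (by omega), List.getD_eq_getElem _ _ (by simp; omega)]
    simp [List.getElem_drop]
  rw [h1, h2, h3, getD_sum_take _ _ (by rw [List.length_drop]; omega),
    List.take_of_length_le (by rw [List.length_drop]; omega)]

lemma sum_even_slots (h : Nat → Int) (m : Nat) :
    ((List.range m).map (fun j => if j % 2 = 0 then h (j / 2) else 0)).sum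
      = ((List.range ((m + 1) / 2)).map h).sum := by
  induction m with
  | zero => simp
  | succ m ih =>
      rw [List.range_succ, List.map_append, List.sum_append, ih]
      by_cases hp : m % 2 = 0
      · rw [show (m + 1 + 1) / 2 = (m + 1) / 2 + 1 from by omega, List.range_succ,
          List.map_append, List.sum_append]
        simp [if_pos hp, show (m + 1) / 2 = m / 2 from by omega]
      · rw [show (m + 1 + 1) / 2 = (m + 1) / 2 from by omega]
        simp [if_neg hp]

lemma term_eval (t : List Int)
    (hmono : ∀ p q : Nat, p ≤ q → q < t.length → t.getD p 0 ≤ t.getD q 0)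
    (j : Nat) (hj : j < t.length - 1) :
    max 0 (zigVal t (j + 1) - zigVal t j)
      = if j % 2 = 0 then t.getD (t.length - 1 - j / 2) 0 - t.getD (j / 2) 0 else 0 := by
  unfold zigVal
  by_cases hp : j % 2 = 0
  · rw [if_pos hp, if_pos hp, if_neg (by omega),
      show (j + 1) / 2 = j / 2 from by omega]
    exact max_eq_right (by have := hmono (j / 2) (t.length - 1 - j / 2) (by omega) (by omega); omega)
  · rw [if_neg hp, if_neg hp, if_pos (by omega),
      show (j + 1) / 2 = j / 2 + 1 from by omega]
    exact max_eq_left (by have := hmono (j / 2 + 1) (t.length - 1 - j / 2) (by omega) (by omega); omega)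

-- ===== VERDICT (by name: the statement is the Claim_ definition above) =====
theorem max_sum_B_spec : Claim_equal_max_sum_B := by
  intro A _
  unfold Spec_max_sum_B max_sum_B_alt
  set t := PySem.List.sorted A (fun x => x) false with ht
  have hmono : ∀ p q : Nat, p ≤ q → q < t.length → t.getD p 0 ≤ t.getD q 0 := by
    intro p q hpq hq
    rw [List.getD_eq_getElem _ _ (by omega), List.getD_eq_getElem _ _ hq]
    exact PySem.List.sorted_id_getElem_mono A hpq hq
  rw [A_parts, ← ht]
  have hk : PySem.Int.floordiv (t.length : Int) 2 = ((t.length / 2 : Nat) : Int) := by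
    exact_mod_cast PySem.Int.floordiv_natCast t.length 2
  have hnk : (t.length : Int) - ((t.length / 2 : Nat) : Int)
      = ((t.length - t.length / 2 : Nat) : Int) := by push_cast; omega
  simp only [hk, hnk, PySem.List.slice_from_natCast, PySem.List.slice_to_natCast]
  refine Prod.ext ?_ (zigPeel_eq t).symm
  show (_ : Int) = _
  rw [PySem.List.pyRange_one, List.map_map,
    show (((t.length : Int) - 1) - 0).toNat = t.length - 1 from by omega]
  have hterms : ((List.range (t.length - 1)).map
      ((fun i => max 0 (PySem.List.pyGetD (zigList t) (i + 1) 0 - PySem.List.pyGetD (zigList t) i 0))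
        ∘ (fun k : Nat => (0 : Int) + k))).sum
      = ((List.range (t.length - 1)).map
          (fun j => if j % 2 = 0 then t.getD (t.length - 1 - j / 2) 0 - t.getD (j / 2) 0 else 0)).sum := by
    congr 1
    apply List.map_congr_left
    intro j hj
    simp only [List.mem_range] at hj
    simp only [Function.comp_apply]
    rw [show (0 : Int) + (j : Int) + 1 = ((j + 1 : Nat) : Int) from by push_cast; ring,
      show (0 : Int) + (j : Int) = ((j : Nat) : Int) from by ring,
      PySem.List.pyGetD_natCast, PySem.List.pyGetD_natCast,
      zigList_getD t (j + 1) (by omega), zigList_getD t j (by omega),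
      term_eval t hmono j hj]
  have hes : ((List.range (t.length - 1)).map
      (fun j => if j % 2 = 0 then t.getD (t.length - 1 - j / 2) 0 - t.getD (j / 2) 0 else 0)).sum
      = ((List.range ((t.length - 1 + 1) / 2)).map
          (fun i => t.getD (t.length - 1 - i) 0 - t.getD i 0)).sum := by
    exact sum_even_slots (fun i => t.getD (t.length - 1 - i) 0 - t.getD i 0) (t.length - 1)
  rw [hterms, hes, show (t.length - 1 + 1) / 2 = t.length / 2 from by omega]
  have hsplit : ((List.range (t.length / 2)).map
      (fun i => t.getD (t.length - 1 - i) 0 - t.getD i 0)).sum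
      = ((List.range (t.length / 2)).map (fun i => t.getD (t.length - 1 - i) 0)).sum
        - ((List.range (t.length / 2)).map (fun i => t.getD i 0)).sum := by
    show (∑ i ∈ Finset.range (t.length / 2), (t.getD (t.length - 1 - i) 0 - t.getD i 0))
      = (∑ i ∈ Finset.range (t.length / 2), t.getD (t.length - 1 - i) 0)
        - ∑ i ∈ Finset.range (t.length / 2), t.getD i 0
    exact Finset.sum_sub_distrib (f := fun i => t.getD (t.length - 1 - i) 0) (g := fun i => t.getD i 0)
  rw [hsplit, getD_sum_take t _ (by omega), getD_sum_drop t _ (by omega)]
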